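-- pv_equiv track=rewrite | github.com/demizer/roms4me | src/roms4me/analyzers/chd.py | _lzma_props
-- ===== SOURCE A (Python) =====
-- import lzma
--
-- def _lzma_props(reduce_size: int) -> dict:
--     """Compute LZMA1 filter properties matching MAME's configure_properties.
--
--     MAME uses: level=8, reduceSize=hunkbytes (or sector_bytes for CD).
--     LzmaEncProps_Normalize computes dictSize using (2+(i&1))<<(i>>1) series
--     (not simple powers of 2), then aligns to the LZMA SDK's dict_size grid.
--     """
--     # level 8 → initial dictSize = 1 << 26 = 64 MB
--     dict_size = 1 << 26
--
--     # Reduce: find smallest value in (2+(i&1))<<(i>>1) series >= reduce_size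
--     if dict_size > reduce_size:
--         for i in range(11, 31):
--             candidate = (2 + (i & 1)) << (i >> 1)
--             if candidate >= reduce_size:
--                 dict_size = candidate
--                 break
--         if dict_size > reduce_size:
--             dict_size = reduce_size
--
--     # Align to LZMA SDK's dictionary size grid (LzmaEnc_WriteProperties)
--     if dict_size >= (1 << 22):
--         mask = (1 << 20) - 1
--         dict_size = (dict_size + mask) & ~mask
--     else:
--         for i in range(11, 31):
--             if dict_size <= (2 << i):
--                 dict_size = 2 << i
--                 break
--             if dict_size <= (3 << i):
--                 dict_size = 3 << i
--                 break
--
--     return {"id": lzma.FILTER_LZMA1, "lc": 3, "lp": 0, "pb": 2,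
--             "dict_size": dict_size}
-- ===== SOURCE B (Python) =====
-- FILTER_LZMA1 = 0x4000000000000001  # lzma.FILTER_LZMA1
--
-- def _lzma_props(reduce_size: int) -> dict:
--     # Stage 1 of the original collapses to a min: every snapped candidate is
--     # >= reduce_size, so the final "if dict_size > reduce_size" reset always
--     # leaves exactly min(reduce_size, 1 << 26).
--     dict_size = reduce_size if reduce_size < (1 << 26) else (1 << 26)
--
--     # Align to the LZMA SDK grid {2<<i, 3<<i} by bit arithmetic instead of a scan
--     if dict_size >= (1 << 22):
--         mask = (1 << 20) - 1
--         dict_size = (dict_size + mask) & ~mask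
--     elif dict_size <= (2 << 11):
--         dict_size = 2 << 11
--     else:
--         p = 1 << (dict_size - 1).bit_length()  # smallest power of two >= dict_size
--         c = 3 * (p >> 2)                       # the 3<<i grid rung just below p
--         dict_size = c if c >= dict_size else p
--
--     return {"id": FILTER_LZMA1, "lc": 3, "lp": 0, "pb": 2,
--             "dict_size": dict_size}
-- ===== Notes on version B (the rewrite author's own statement) =====
-- stated objective: simpler
-- what changed: Both bounded grid scans are removed: the first range(11,31) scan plus reset provably collapses to min(reduce_size, 1<<26), and the second alignment scan is replaced by a closed-form choice between the 2<<i and 3<<i rung computed from (dict_size-1).bit_length().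
import Mathlib
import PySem

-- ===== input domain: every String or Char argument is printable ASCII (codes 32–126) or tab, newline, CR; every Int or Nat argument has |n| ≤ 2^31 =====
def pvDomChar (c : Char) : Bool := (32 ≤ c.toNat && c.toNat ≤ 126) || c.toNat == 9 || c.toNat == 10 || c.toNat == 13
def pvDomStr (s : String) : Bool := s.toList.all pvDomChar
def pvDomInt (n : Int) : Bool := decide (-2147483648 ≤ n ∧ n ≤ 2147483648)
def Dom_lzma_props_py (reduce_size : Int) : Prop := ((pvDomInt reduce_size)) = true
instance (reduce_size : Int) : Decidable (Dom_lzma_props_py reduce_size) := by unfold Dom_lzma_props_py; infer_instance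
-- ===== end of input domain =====

-- B replaces A's two bounded grid scans by closed-form bit arithmetic (a min plus a
-- bit_length computation); same return value everywhere, no side effects.

-- ===== PORT A =====
-- first stage loop: 'for i in range(11,31): candidate = (2+(i&1))<<(i>>1); if candidate >= reduce_size: dict_size = candidate; break'
-- (i ranges over 11..30, so i ≥ 0 and the .toNat on the shift amount is exact)
def lzmaReduceLoop (reduce_size dict_size : Int) : List Int → Int
  | [] => dict_size
  | i :: rest =>
    let candidate : Int := (2 + PySem.Int.band i 1) <<< ((i >>> (1:Nat)).toNat)
    if candidate ≥ reduce_size then candidate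
    else lzmaReduceLoop reduce_size dict_size rest

-- second stage loop: 'for i in range(11,31): if dict_size <= (2 << i): … break; if dict_size <= (3 << i): … break'
def lzmaAlign (ds : Int) : List Int → Int
  | [] => ds
  | i :: rest =>
    if ds ≤ 2 <<< i.toNat then 2 <<< i.toNat
    else if ds ≤ 3 <<< i.toNat then 3 <<< i.toNat
    else lzmaAlign ds rest

def lzma_props_py (reduce_size : Int) : List (String × Int) :=
  let dict_size : Int := 67108864        -- 1 << 26
  let dict_size : Int :=
    if dict_size > reduce_size then
      let d1 : Int := lzmaReduceLoop reduce_size dict_size (PySem.List.pyRange 11 31 1)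
      if d1 > reduce_size then reduce_size else d1
    else dict_size
  let dict_size : Int :=
    if dict_size ≥ 4194304 then          -- 1 << 22
      let mask : Int := 1048575          -- (1 << 20) - 1
      PySem.Int.band (dict_size + mask) (Int.not mask)   -- (dict_size + mask) & ~mask
    else lzmaAlign dict_size (PySem.List.pyRange 11 31 1)
  [("id", 4611686018427387905), ("lc", 3), ("lp", 0), ("pb", 2), ("dict_size", dict_size)]

-- ===== PORT B =====
def lzma_props_py_alt (reduce_size : Int) : List (String × Int) :=
  let dict_size : Int := if reduce_size < 67108864 then reduce_size else 67108864   -- min(reduce_size, 1 << 26)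
  let dict_size : Int :=
    if dict_size ≥ 4194304 then          -- 1 << 22
      let mask : Int := 1048575          -- (1 << 20) - 1
      PySem.Int.band (dict_size + mask) (Int.not mask)   -- (dict_size + mask) & ~mask
    else if dict_size ≤ 4096 then (4096 : Int)           -- 2 << 11
    else
      let p : Int := (1 : Int) <<< PySem.Int.bitLength (dict_size - 1)  -- 1 << (dict_size-1).bit_length()
      let c : Int := 3 * (p >>> (2:Nat))                                -- 3 * (p >> 2)
      if c ≥ dict_size then c else p
  [("id", 4611686018427387905), ("lc", 3), ("lp", 0), ("pb", 2), ("dict_size", dict_size)]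

-- ===== PRECONDITION & SPEC =====
def Spec_lzma_props_py (reduce_size : Int) (out : List (String × Int)) : Prop := out = lzma_props_py_alt reduce_size
instance (reduce_size : Int) (out : List (String × Int)) : Decidable (Spec_lzma_props_py reduce_size out) := by unfold Spec_lzma_props_py; infer_instance

-- ===== CLAIM (what is proved, stated in full; the proofs are below) =====
def Claim_equal_lzma_props_py : Prop := ∀ (reduce_size : Int), Dom_lzma_props_py reduce_size → Spec_lzma_props_py reduce_size (lzma_props_py reduce_size)

-- ===== LEMMAS AND PROOFS =====

-- the first-stage loop never returns anything below reduce_size (each accepted candidate is ≥ reduce_size)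
lemma reduceLoop_ge (r d0 : Int) (h : r ≤ d0) : ∀ l : List Int, r ≤ lzmaReduceLoop r d0 l := by
  intro l
  induction l with
  | nil => simpa [lzmaReduceLoop] using h
  | cons i rest ih =>
    simp only [lzmaReduceLoop]
    split
    · omega
    · exact ih

-- Python's bit_length on a positive int, characterised by the enclosing power-of-two interval
lemma bitLength_pow_interval : ∀ (k : Nat) (n : Int), 2 ^ k ≤ n → n < 2 ^ (k + 1) → PySem.Int.bitLength n = k + 1 := by
  intro k
  induction k with
  | zero =>
    intro n h1 h2
    norm_num at h1 h2
    have hn : n = 1 := by omega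
    subst hn
    decide
  | succ k ih =>
    intro n h1 h2
    have hpos : (0:Int) < n := lt_of_lt_of_le (by positivity) h1
    rw [PySem.Int.bitLength_of_pos hpos]
    have hq := (PySem.Int.floordiv_eq_iff_of_pos (a := n) (b := 2) (q := PySem.Int.floordiv n 2) (by norm_num)).mp rfl
    have hfd1 : 2 ^ k ≤ PySem.Int.floordiv n 2 := by
      rw [pow_succ] at h1
      obtain ⟨ha, hb⟩ := hq
      generalize (2:Int) ^ k = P at h1 ⊢
      omega
    have hfd2 : PySem.Int.floordiv n 2 < 2 ^ (k + 1) := by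
      rw [pow_succ] at h2
      obtain ⟨ha, hb⟩ := hq
      generalize (2:Int) ^ (k + 1) = Q at h2 ⊢
      omega
    rw [ih _ hfd1 hfd2]

-- the three possible outcomes of one iteration of the alignment loop
lemma align_two (ds i : Int) (rest : List Int) (h : ds ≤ (2:Int) <<< i.toNat) :
    lzmaAlign ds (i :: rest) = (2:Int) <<< i.toNat := by
  simp [lzmaAlign, h]

lemma align_three (ds i : Int) (rest : List Int) (h1 : ¬ ds ≤ (2:Int) <<< i.toNat) (h2 : ds ≤ (3:Int) <<< i.toNat) :
    lzmaAlign ds (i :: rest) = (3:Int) <<< i.toNat := by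
  simp [lzmaAlign, h1, h2]

lemma align_skip (ds i : Int) (rest : List Int) (h1 : ¬ ds ≤ (2:Int) <<< i.toNat) (h2 : ¬ ds ≤ (3:Int) <<< i.toNat) :
    lzmaAlign ds (i :: rest) = lzmaAlign ds rest := by
  simp [lzmaAlign, h1, h2]

-- the grid rungs 2 << i and 3 << i, i = 11 .. 21, as numerals
lemma c2_11 : ((2:Int) <<< ((11:Int)).toNat) = 4096 := by decide
lemma c3_11 : ((3:Int) <<< ((11:Int)).toNat) = 6144 := by decide
lemma c2_12 : ((2:Int) <<< ((12:Int)).toNat) = 8192 := by decide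
lemma c3_12 : ((3:Int) <<< ((12:Int)).toNat) = 12288 := by decide
lemma c2_13 : ((2:Int) <<< ((13:Int)).toNat) = 16384 := by decide
lemma c3_13 : ((3:Int) <<< ((13:Int)).toNat) = 24576 := by decide
lemma c2_14 : ((2:Int) <<< ((14:Int)).toNat) = 32768 := by decide
lemma c3_14 : ((3:Int) <<< ((14:Int)).toNat) = 49152 := by decide
lemma c2_15 : ((2:Int) <<< ((15:Int)).toNat) = 65536 := by decide
lemma c3_15 : ((3:Int) <<< ((15:Int)).toNat) = 98304 := by decide
lemma c2_16 : ((2:Int) <<< ((16:Int)).toNat) = 131072 := by decide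
lemma c3_16 : ((3:Int) <<< ((16:Int)).toNat) = 196608 := by decide
lemma c2_17 : ((2:Int) <<< ((17:Int)).toNat) = 262144 := by decide
lemma c3_17 : ((3:Int) <<< ((17:Int)).toNat) = 393216 := by decide
lemma c2_18 : ((2:Int) <<< ((18:Int)).toNat) = 524288 := by decide
lemma c3_18 : ((3:Int) <<< ((18:Int)).toNat) = 786432 := by decide
lemma c2_19 : ((2:Int) <<< ((19:Int)).toNat) = 1048576 := by decide
lemma c3_19 : ((3:Int) <<< ((19:Int)).toNat) = 1572864 := by decide
lemma c2_20 : ((2:Int) <<< ((20:Int)).toNat) = 2097152 := by decide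
lemma c3_20 : ((3:Int) <<< ((20:Int)).toNat) = 3145728 := by decide
lemma c2_21 : ((2:Int) <<< ((21:Int)).toNat) = 4194304 := by decide

-- the alignment loop equals B's closed form below the masking threshold
lemma align_eq (ds : Int) (hlt : ds < 4194304) :
    lzmaAlign ds (PySem.List.pyRange 11 31 1) =
      (if ds ≤ 4096 then (4096 : Int)
       else if 3 * (((1:Int) <<< PySem.Int.bitLength (ds - 1)) >>> (2:Nat)) ≥ ds
            then 3 * (((1:Int) <<< PySem.Int.bitLength (ds - 1)) >>> (2:Nat))
            else (1:Int) <<< PySem.Int.bitLength (ds - 1)) := by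
  rw [show PySem.List.pyRange 11 31 1 = [11,12,13,14,15,16,17,18,19,20,21,22,23,24,25,26,27,28,29,30] from by decide]
  by_cases h0 : ds ≤ 4096
  · rw [align_two ds 11 _ (by rw [c2_11]; omega), if_pos h0, c2_11]
  by_cases h1 : ds ≤ 6144
  · rw [align_three ds 11 _ (by rw [c2_11]; omega) (by rw [c3_11]; omega)]
    rw [if_neg h0]
    have hb : PySem.Int.bitLength (ds - 1) = 13 := bitLength_pow_interval 12 (ds - 1) (by norm_num; omega) (by norm_num; omega)
    rw [hb]
    rw [show (3 * (((1:Int) <<< (13:Nat)) >>> (2:Nat))) = 6144 from by decide]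
    rw [show ((1:Int) <<< (13:Nat)) = 8192 from by decide]
    rw [if_pos (by omega)]
    rw [c3_11]
  · by_cases h2 : ds ≤ 8192
    · rw [align_skip ds 11 _ (by rw [c2_11]; omega) (by rw [c3_11]; omega)]
      rw [align_two ds 12 _ (by rw [c2_12]; omega)]
      rw [if_neg h0]
      have hb : PySem.Int.bitLength (ds - 1) = 13 := bitLength_pow_interval 12 (ds - 1) (by norm_num; omega) (by norm_num; omega)
      rw [hb]
      rw [show (3 * (((1:Int) <<< (13:Nat)) >>> (2:Nat))) = 6144 from by decide]
      rw [show ((1:Int) <<< (13:Nat)) = 8192 from by decide]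
      rw [if_neg (by omega)]
      rw [c2_12]
    · by_cases h3 : ds ≤ 12288
      · rw [align_skip ds 11 _ (by rw [c2_11]; omega) (by rw [c3_11]; omega)]
        rw [align_three ds 12 _ (by rw [c2_12]; omega) (by rw [c3_12]; omega)]
        rw [if_neg h0]
        have hb : PySem.Int.bitLength (ds - 1) = 14 := bitLength_pow_interval 13 (ds - 1) (by norm_num; omega) (by norm_num; omega)
        rw [hb]
        rw [show (3 * (((1:Int) <<< (14:Nat)) >>> (2:Nat))) = 12288 from by decide]
        rw [show ((1:Int) <<< (14:Nat)) = 16384 from by decide]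
        rw [if_pos (by omega)]
        rw [c3_12]
      · by_cases h4 : ds ≤ 16384
        · rw [align_skip ds 11 _ (by rw [c2_11]; omega) (by rw [c3_11]; omega)]
          rw [align_skip ds 12 _ (by rw [c2_12]; omega) (by rw [c3_12]; omega)]
          rw [align_two ds 13 _ (by rw [c2_13]; omega)]
          rw [if_neg h0]
          have hb : PySem.Int.bitLength (ds - 1) = 14 := bitLength_pow_interval 13 (ds - 1) (by norm_num; omega) (by norm_num; omega)
          rw [hb]
          rw [show (3 * (((1:Int) <<< (14:Nat)) >>> (2:Nat))) = 12288 from by decide]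
          rw [show ((1:Int) <<< (14:Nat)) = 16384 from by decide]
          rw [if_neg (by omega)]
          rw [c2_13]
        · by_cases h5 : ds ≤ 24576
          · rw [align_skip ds 11 _ (by rw [c2_11]; omega) (by rw [c3_11]; omega)]
            rw [align_skip ds 12 _ (by rw [c2_12]; omega) (by rw [c3_12]; omega)]
            rw [align_three ds 13 _ (by rw [c2_13]; omega) (by rw [c3_13]; omega)]
            rw [if_neg h0]
            have hb : PySem.Int.bitLength (ds - 1) = 15 := bitLength_pow_interval 14 (ds - 1) (by norm_num; omega) (by norm_num; omega)
            rw [hb]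
            rw [show (3 * (((1:Int) <<< (15:Nat)) >>> (2:Nat))) = 24576 from by decide]
            rw [show ((1:Int) <<< (15:Nat)) = 32768 from by decide]
            rw [if_pos (by omega)]
            rw [c3_13]
          · by_cases h6 : ds ≤ 32768
            · rw [align_skip ds 11 _ (by rw [c2_11]; omega) (by rw [c3_11]; omega)]
              rw [align_skip ds 12 _ (by rw [c2_12]; omega) (by rw [c3_12]; omega)]
              rw [align_skip ds 13 _ (by rw [c2_13]; omega) (by rw [c3_13]; omega)]
              rw [align_two ds 14 _ (by rw [c2_14]; omega)]
              rw [if_neg h0]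
              have hb : PySem.Int.bitLength (ds - 1) = 15 := bitLength_pow_interval 14 (ds - 1) (by norm_num; omega) (by norm_num; omega)
              rw [hb]
              rw [show (3 * (((1:Int) <<< (15:Nat)) >>> (2:Nat))) = 24576 from by decide]
              rw [show ((1:Int) <<< (15:Nat)) = 32768 from by decide]
              rw [if_neg (by omega)]
              rw [c2_14]
            · by_cases h7 : ds ≤ 49152
              · rw [align_skip ds 11 _ (by rw [c2_11]; omega) (by rw [c3_11]; omega)]
                rw [align_skip ds 12 _ (by rw [c2_12]; omega) (by rw [c3_12]; omega)]
                rw [align_skip ds 13 _ (by rw [c2_13]; omega) (by rw [c3_13]; omega)]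
                rw [align_three ds 14 _ (by rw [c2_14]; omega) (by rw [c3_14]; omega)]
                rw [if_neg h0]
                have hb : PySem.Int.bitLength (ds - 1) = 16 := bitLength_pow_interval 15 (ds - 1) (by norm_num; omega) (by norm_num; omega)
                rw [hb]
                rw [show (3 * (((1:Int) <<< (16:Nat)) >>> (2:Nat))) = 49152 from by decide]
                rw [show ((1:Int) <<< (16:Nat)) = 65536 from by decide]
                rw [if_pos (by omega)]
                rw [c3_14]
              · by_cases h8 : ds ≤ 65536
                · rw [align_skip ds 11 _ (by rw [c2_11]; omega) (by rw [c3_11]; omega)]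
                  rw [align_skip ds 12 _ (by rw [c2_12]; omega) (by rw [c3_12]; omega)]
                  rw [align_skip ds 13 _ (by rw [c2_13]; omega) (by rw [c3_13]; omega)]
                  rw [align_skip ds 14 _ (by rw [c2_14]; omega) (by rw [c3_14]; omega)]
                  rw [align_two ds 15 _ (by rw [c2_15]; omega)]
                  rw [if_neg h0]
                  have hb : PySem.Int.bitLength (ds - 1) = 16 := bitLength_pow_interval 15 (ds - 1) (by norm_num; omega) (by norm_num; omega)
                  rw [hb]
                  rw [show (3 * (((1:Int) <<< (16:Nat)) >>> (2:Nat))) = 49152 from by decide]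
                  rw [show ((1:Int) <<< (16:Nat)) = 65536 from by decide]
                  rw [if_neg (by omega)]
                  rw [c2_15]
                · by_cases h9 : ds ≤ 98304
                  · rw [align_skip ds 11 _ (by rw [c2_11]; omega) (by rw [c3_11]; omega)]
                    rw [align_skip ds 12 _ (by rw [c2_12]; omega) (by rw [c3_12]; omega)]
                    rw [align_skip ds 13 _ (by rw [c2_13]; omega) (by rw [c3_13]; omega)]
                    rw [align_skip ds 14 _ (by rw [c2_14]; omega) (by rw [c3_14]; omega)]
                    rw [align_three ds 15 _ (by rw [c2_15]; omega) (by rw [c3_15]; omega)]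
                    rw [if_neg h0]
                    have hb : PySem.Int.bitLength (ds - 1) = 17 := bitLength_pow_interval 16 (ds - 1) (by norm_num; omega) (by norm_num; omega)
                    rw [hb]
                    rw [show (3 * (((1:Int) <<< (17:Nat)) >>> (2:Nat))) = 98304 from by decide]
                    rw [show ((1:Int) <<< (17:Nat)) = 131072 from by decide]
                    rw [if_pos (by omega)]
                    rw [c3_15]
                  · by_cases h10 : ds ≤ 131072
                    · rw [align_skip ds 11 _ (by rw [c2_11]; omega) (by rw [c3_11]; omega)]
                      rw [align_skip ds 12 _ (by rw [c2_12]; omega) (by rw [c3_12]; omega)]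
                      rw [align_skip ds 13 _ (by rw [c2_13]; omega) (by rw [c3_13]; omega)]
                      rw [align_skip ds 14 _ (by rw [c2_14]; omega) (by rw [c3_14]; omega)]
                      rw [align_skip ds 15 _ (by rw [c2_15]; omega) (by rw [c3_15]; omega)]
                      rw [align_two ds 16 _ (by rw [c2_16]; omega)]
                      rw [if_neg h0]
                      have hb : PySem.Int.bitLength (ds - 1) = 17 := bitLength_pow_interval 16 (ds - 1) (by norm_num; omega) (by norm_num; omega)
                      rw [hb]
                      rw [show (3 * (((1:Int) <<< (17:Nat)) >>> (2:Nat))) = 98304 from by decide]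
                      rw [show ((1:Int) <<< (17:Nat)) = 131072 from by decide]
                      rw [if_neg (by omega)]
                      rw [c2_16]
                    · by_cases h11 : ds ≤ 196608
                      · rw [align_skip ds 11 _ (by rw [c2_11]; omega) (by rw [c3_11]; omega)]
                        rw [align_skip ds 12 _ (by rw [c2_12]; omega) (by rw [c3_12]; omega)]
                        rw [align_skip ds 13 _ (by rw [c2_13]; omega) (by rw [c3_13]; omega)]
                        rw [align_skip ds 14 _ (by rw [c2_14]; omega) (by rw [c3_14]; omega)]
                        rw [align_skip ds 15 _ (by rw [c2_15]; omega) (by rw [c3_15]; omega)]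
                        rw [align_three ds 16 _ (by rw [c2_16]; omega) (by rw [c3_16]; omega)]
                        rw [if_neg h0]
                        have hb : PySem.Int.bitLength (ds - 1) = 18 := bitLength_pow_interval 17 (ds - 1) (by norm_num; omega) (by norm_num; omega)
                        rw [hb]
                        rw [show (3 * (((1:Int) <<< (18:Nat)) >>> (2:Nat))) = 196608 from by decide]
                        rw [show ((1:Int) <<< (18:Nat)) = 262144 from by decide]
                        rw [if_pos (by omega)]
                        rw [c3_16]
                      · by_cases h12 : ds ≤ 262144
                        · rw [align_skip ds 11 _ (by rw [c2_11]; omega) (by rw [c3_11]; omega)]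
                          rw [align_skip ds 12 _ (by rw [c2_12]; omega) (by rw [c3_12]; omega)]
                          rw [align_skip ds 13 _ (by rw [c2_13]; omega) (by rw [c3_13]; omega)]
                          rw [align_skip ds 14 _ (by rw [c2_14]; omega) (by rw [c3_14]; omega)]
                          rw [align_skip ds 15 _ (by rw [c2_15]; omega) (by rw [c3_15]; omega)]
                          rw [align_skip ds 16 _ (by rw [c2_16]; omega) (by rw [c3_16]; omega)]
                          rw [align_two ds 17 _ (by rw [c2_17]; omega)]
                          rw [if_neg h0]
                          have hb : PySem.Int.bitLength (ds - 1) = 18 := bitLength_pow_interval 17 (ds - 1) (by norm_num; omega) (by norm_num; omega)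
                          rw [hb]
                          rw [show (3 * (((1:Int) <<< (18:Nat)) >>> (2:Nat))) = 196608 from by decide]
                          rw [show ((1:Int) <<< (18:Nat)) = 262144 from by decide]
                          rw [if_neg (by omega)]
                          rw [c2_17]
                        · by_cases h13 : ds ≤ 393216
                          · rw [align_skip ds 11 _ (by rw [c2_11]; omega) (by rw [c3_11]; omega)]
                            rw [align_skip ds 12 _ (by rw [c2_12]; omega) (by rw [c3_12]; omega)]
                            rw [align_skip ds 13 _ (by rw [c2_13]; omega) (by rw [c3_13]; omega)]
                            rw [align_skip ds 14 _ (by rw [c2_14]; omega) (by rw [c3_14]; omega)]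
                            rw [align_skip ds 15 _ (by rw [c2_15]; omega) (by rw [c3_15]; omega)]
                            rw [align_skip ds 16 _ (by rw [c2_16]; omega) (by rw [c3_16]; omega)]
                            rw [align_three ds 17 _ (by rw [c2_17]; omega) (by rw [c3_17]; omega)]
                            rw [if_neg h0]
                            have hb : PySem.Int.bitLength (ds - 1) = 19 := bitLength_pow_interval 18 (ds - 1) (by norm_num; omega) (by norm_num; omega)
                            rw [hb]
                            rw [show (3 * (((1:Int) <<< (19:Nat)) >>> (2:Nat))) = 393216 from by decide]
                            rw [show ((1:Int) <<< (19:Nat)) = 524288 from by decide]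
                            rw [if_pos (by omega)]
                            rw [c3_17]
                          · by_cases h14 : ds ≤ 524288
                            · rw [align_skip ds 11 _ (by rw [c2_11]; omega) (by rw [c3_11]; omega)]
                              rw [align_skip ds 12 _ (by rw [c2_12]; omega) (by rw [c3_12]; omega)]
                              rw [align_skip ds 13 _ (by rw [c2_13]; omega) (by rw [c3_13]; omega)]
                              rw [align_skip ds 14 _ (by rw [c2_14]; omega) (by rw [c3_14]; omega)]
                              rw [align_skip ds 15 _ (by rw [c2_15]; omega) (by rw [c3_15]; omega)]
                              rw [align_skip ds 16 _ (by rw [c2_16]; omega) (by rw [c3_16]; omega)]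
                              rw [align_skip ds 17 _ (by rw [c2_17]; omega) (by rw [c3_17]; omega)]
                              rw [align_two ds 18 _ (by rw [c2_18]; omega)]
                              rw [if_neg h0]
                              have hb : PySem.Int.bitLength (ds - 1) = 19 := bitLength_pow_interval 18 (ds - 1) (by norm_num; omega) (by norm_num; omega)
                              rw [hb]
                              rw [show (3 * (((1:Int) <<< (19:Nat)) >>> (2:Nat))) = 393216 from by decide]
                              rw [show ((1:Int) <<< (19:Nat)) = 524288 from by decide]
                              rw [if_neg (by omega)]
                              rw [c2_18]
                            · by_cases h15 : ds ≤ 786432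
                              · rw [align_skip ds 11 _ (by rw [c2_11]; omega) (by rw [c3_11]; omega)]
                                rw [align_skip ds 12 _ (by rw [c2_12]; omega) (by rw [c3_12]; omega)]
                                rw [align_skip ds 13 _ (by rw [c2_13]; omega) (by rw [c3_13]; omega)]
                                rw [align_skip ds 14 _ (by rw [c2_14]; omega) (by rw [c3_14]; omega)]
                                rw [align_skip ds 15 _ (by rw [c2_15]; omega) (by rw [c3_15]; omega)]
                                rw [align_skip ds 16 _ (by rw [c2_16]; omega) (by rw [c3_16]; omega)]
                                rw [align_skip ds 17 _ (by rw [c2_17]; omega) (by rw [c3_17]; omega)]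
                                rw [align_three ds 18 _ (by rw [c2_18]; omega) (by rw [c3_18]; omega)]
                                rw [if_neg h0]
                                have hb : PySem.Int.bitLength (ds - 1) = 20 := bitLength_pow_interval 19 (ds - 1) (by norm_num; omega) (by norm_num; omega)
                                rw [hb]
                                rw [show (3 * (((1:Int) <<< (20:Nat)) >>> (2:Nat))) = 786432 from by decide]
                                rw [show ((1:Int) <<< (20:Nat)) = 1048576 from by decide]
                                rw [if_pos (by omega)]
                                rw [c3_18]
                              · by_cases h16 : ds ≤ 1048576
                                · rw [align_skip ds 11 _ (by rw [c2_11]; omega) (by rw [c3_11]; omega)]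
                                  rw [align_skip ds 12 _ (by rw [c2_12]; omega) (by rw [c3_12]; omega)]
                                  rw [align_skip ds 13 _ (by rw [c2_13]; omega) (by rw [c3_13]; omega)]
                                  rw [align_skip ds 14 _ (by rw [c2_14]; omega) (by rw [c3_14]; omega)]
                                  rw [align_skip ds 15 _ (by rw [c2_15]; omega) (by rw [c3_15]; omega)]
                                  rw [align_skip ds 16 _ (by rw [c2_16]; omega) (by rw [c3_16]; omega)]
                                  rw [align_skip ds 17 _ (by rw [c2_17]; omega) (by rw [c3_17]; omega)]
                                  rw [align_skip ds 18 _ (by rw [c2_18]; omega) (by rw [c3_18]; omega)]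
                                  rw [align_two ds 19 _ (by rw [c2_19]; omega)]
                                  rw [if_neg h0]
                                  have hb : PySem.Int.bitLength (ds - 1) = 20 := bitLength_pow_interval 19 (ds - 1) (by norm_num; omega) (by norm_num; omega)
                                  rw [hb]
                                  rw [show (3 * (((1:Int) <<< (20:Nat)) >>> (2:Nat))) = 786432 from by decide]
                                  rw [show ((1:Int) <<< (20:Nat)) = 1048576 from by decide]
                                  rw [if_neg (by omega)]
                                  rw [c2_19]
                                · by_cases h17 : ds ≤ 1572864
                                  · rw [align_skip ds 11 _ (by rw [c2_11]; omega) (by rw [c3_11]; omega)]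
                                    rw [align_skip ds 12 _ (by rw [c2_12]; omega) (by rw [c3_12]; omega)]
                                    rw [align_skip ds 13 _ (by rw [c2_13]; omega) (by rw [c3_13]; omega)]
                                    rw [align_skip ds 14 _ (by rw [c2_14]; omega) (by rw [c3_14]; omega)]
                                    rw [align_skip ds 15 _ (by rw [c2_15]; omega) (by rw [c3_15]; omega)]
                                    rw [align_skip ds 16 _ (by rw [c2_16]; omega) (by rw [c3_16]; omega)]
                                    rw [align_skip ds 17 _ (by rw [c2_17]; omega) (by rw [c3_17]; omega)]
                                    rw [align_skip ds 18 _ (by rw [c2_18]; omega) (by rw [c3_18]; omega)]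
                                    rw [align_three ds 19 _ (by rw [c2_19]; omega) (by rw [c3_19]; omega)]
                                    rw [if_neg h0]
                                    have hb : PySem.Int.bitLength (ds - 1) = 21 := bitLength_pow_interval 20 (ds - 1) (by norm_num; omega) (by norm_num; omega)
                                    rw [hb]
                                    rw [show (3 * (((1:Int) <<< (21:Nat)) >>> (2:Nat))) = 1572864 from by decide]
                                    rw [show ((1:Int) <<< (21:Nat)) = 2097152 from by decide]
                                    rw [if_pos (by omega)]
                                    rw [c3_19]
                                  · by_cases h18 : ds ≤ 2097152
                                    · rw [align_skip ds 11 _ (by rw [c2_11]; omega) (by rw [c3_11]; omega)]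
                                      rw [align_skip ds 12 _ (by rw [c2_12]; omega) (by rw [c3_12]; omega)]
                                      rw [align_skip ds 13 _ (by rw [c2_13]; omega) (by rw [c3_13]; omega)]
                                      rw [align_skip ds 14 _ (by rw [c2_14]; omega) (by rw [c3_14]; omega)]
                                      rw [align_skip ds 15 _ (by rw [c2_15]; omega) (by rw [c3_15]; omega)]
                                      rw [align_skip ds 16 _ (by rw [c2_16]; omega) (by rw [c3_16]; omega)]
                                      rw [align_skip ds 17 _ (by rw [c2_17]; omega) (by rw [c3_17]; omega)]
                                      rw [align_skip ds 18 _ (by rw [c2_18]; omega) (by rw [c3_18]; omega)]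
                                      rw [align_skip ds 19 _ (by rw [c2_19]; omega) (by rw [c3_19]; omega)]
                                      rw [align_two ds 20 _ (by rw [c2_20]; omega)]
                                      rw [if_neg h0]
                                      have hb : PySem.Int.bitLength (ds - 1) = 21 := bitLength_pow_interval 20 (ds - 1) (by norm_num; omega) (by norm_num; omega)
                                      rw [hb]
                                      rw [show (3 * (((1:Int) <<< (21:Nat)) >>> (2:Nat))) = 1572864 from by decide]
                                      rw [show ((1:Int) <<< (21:Nat)) = 2097152 from by decide]
                                      rw [if_neg (by omega)]
                                      rw [c2_20]
                                    · by_cases h19 : ds ≤ 3145728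
                                      · rw [align_skip ds 11 _ (by rw [c2_11]; omega) (by rw [c3_11]; omega)]
                                        rw [align_skip ds 12 _ (by rw [c2_12]; omega) (by rw [c3_12]; omega)]
                                        rw [align_skip ds 13 _ (by rw [c2_13]; omega) (by rw [c3_13]; omega)]
                                        rw [align_skip ds 14 _ (by rw [c2_14]; omega) (by rw [c3_14]; omega)]
                                        rw [align_skip ds 15 _ (by rw [c2_15]; omega) (by rw [c3_15]; omega)]
                                        rw [align_skip ds 16 _ (by rw [c2_16]; omega) (by rw [c3_16]; omega)]
                                        rw [align_skip ds 17 _ (by rw [c2_17]; omega) (by rw [c3_17]; omega)]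
                                        rw [align_skip ds 18 _ (by rw [c2_18]; omega) (by rw [c3_18]; omega)]
                                        rw [align_skip ds 19 _ (by rw [c2_19]; omega) (by rw [c3_19]; omega)]
                                        rw [align_three ds 20 _ (by rw [c2_20]; omega) (by rw [c3_20]; omega)]
                                        rw [if_neg h0]
                                        have hb : PySem.Int.bitLength (ds - 1) = 22 := bitLength_pow_interval 21 (ds - 1) (by norm_num; omega) (by norm_num; omega)
                                        rw [hb]
                                        rw [show (3 * (((1:Int) <<< (22:Nat)) >>> (2:Nat))) = 3145728 from by decide]
                                        rw [show ((1:Int) <<< (22:Nat)) = 4194304 from by decide]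
                                        rw [if_pos (by omega)]
                                        rw [c3_20]
                                      · rw [align_skip ds 11 _ (by rw [c2_11]; omega) (by rw [c3_11]; omega)]
                                        rw [align_skip ds 12 _ (by rw [c2_12]; omega) (by rw [c3_12]; omega)]
                                        rw [align_skip ds 13 _ (by rw [c2_13]; omega) (by rw [c3_13]; omega)]
                                        rw [align_skip ds 14 _ (by rw [c2_14]; omega) (by rw [c3_14]; omega)]
                                        rw [align_skip ds 15 _ (by rw [c2_15]; omega) (by rw [c3_15]; omega)]
                                        rw [align_skip ds 16 _ (by rw [c2_16]; omega) (by rw [c3_16]; omega)]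
                                        rw [align_skip ds 17 _ (by rw [c2_17]; omega) (by rw [c3_17]; omega)]
                                        rw [align_skip ds 18 _ (by rw [c2_18]; omega) (by rw [c3_18]; omega)]
                                        rw [align_skip ds 19 _ (by rw [c2_19]; omega) (by rw [c3_19]; omega)]
                                        rw [align_skip ds 20 _ (by rw [c2_20]; omega) (by rw [c3_20]; omega)]
                                        rw [align_two ds 21 _ (by rw [c2_21]; omega)]
                                        rw [if_neg h0]
                                        have hb : PySem.Int.bitLength (ds - 1) = 22 := bitLength_pow_interval 21 (ds - 1) (by norm_num; omega) (by norm_num; omega)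
                                        rw [hb]
                                        rw [show (3 * (((1:Int) <<< (22:Nat)) >>> (2:Nat))) = 3145728 from by decide]
                                        rw [show ((1:Int) <<< (22:Nat)) = 4194304 from by decide]
                                        rw [if_neg (by omega)]
                                        rw [c2_21]

-- ===== VERDICT (by name: the statement is the Claim_ definition above) =====
theorem lzma_props_py_spec : Claim_equal_lzma_props_py := by
  intro r _
  unfold Spec_lzma_props_py
  simp only [lzma_props_py, lzma_props_py_alt]
  by_cases h26 : r < 67108864
  · rw [if_pos (show (67108864:Int) > r from h26), if_pos h26]
    have hge := reduceLoop_ge r 67108864 (by omega) (PySem.List.pyRange 11 31 1)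
    have hred : (if lzmaReduceLoop r 67108864 (PySem.List.pyRange 11 31 1) > r then r
                 else lzmaReduceLoop r 67108864 (PySem.List.pyRange 11 31 1)) = r := by
      split_ifs <;> omega
    rw [hred]
    by_cases h22 : r ≥ 4194304
    · rw [if_pos h22, if_pos h22]
    · rw [if_neg h22, if_neg h22, align_eq r (by omega)]
  · rw [if_neg (show ¬ (67108864:Int) > r from h26), if_neg h26]
    norm_num
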